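-- pv_equiv track=rewrite | github.com/praneeth9666/Compiler_Consutruction_Labs | final-team_eric_mrp-main/src/pyyc/optimize.py | process_code_block
-- ===== SOURCE A (Python) =====
-- def is_special_numeric(x):
--     if "-" in x:
--         return x.replace("-", "").isnumeric()
--     return x.isnumeric()
--
-- def contains_special_char(line):
--     ops = ["+", "!=", "==", ">", "<", ">=", "<=", "-", "(", ")", "[", "]", "{", "}", ":", ",", "."]
--     splits = line.split(" ")
--     for x in splits:
--         for y in ops:
--             if y in x:
--                 return True
--     return False
--
-- def process_code_block(code, prev_lives, live_map, code_len):
--     lives = []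
--     reserved = ["if", "while", "return", "else", "(", ")", "[", "]", "{", "}", ":", ","]
--     currset = prev_lives
--     for x in range(len(code) - 1, -1, -1):
--         if not code[x]:
--             continue
--         r = set()
--         w = set()
--         lives.insert(0, currset)
--         line = code[x].replace("(", "( ").replace(")", " )").replace("[", " [ ").replace("]", " ] ").replace("}", " }").replace(",", "").strip()
--         live_map[code_len - len(live_map)] = currset
--         token = line.split(" ")
--
--         if " = " in line:
--             for y in range(2, len(token)):
--                 if not contains_special_char(token[y]) and not is_special_numeric(token[y]) and token[y] not in reserved and token[y]:
--                     r.add(token[y])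
--             w.add(token[0])
--         else:
--             for y in range(0, len(token)):
--                 t = token[y]
--                 if not contains_special_char(t) and not t.isnumeric() and t not in reserved:
--                     r.add(t)
--
--         currset = (currset - w) | r
--     lives.insert(0, currset)
--     return lives
-- ===== SOURCE B (Python) =====
-- def process_code_block(code, prev_lives, live_map, code_len):
--     ops = ["+", "!=", "==", ">", "<", ">=", "<=", "-", "(", ")", "[", "]", "{", "}", ":", ",", "."]
--     reserved = ["if", "while", "return", "else", "(", ")", "[", "]", "{", "}", ":", ","]
--
--     def lex(raw):
--         line = raw.replace("(", "( ").replace(")", " )").replace("[", " [ ").replace("]", " ] ").replace("}", " }").replace(",", "").strip()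
--         toks = line.split(" ")
--         if " = " in line:
--             r = {t for t in toks[2:] if t and not any(op in t for op in ops)
--                  and not t.isnumeric() and t not in reserved}
--             return r, {toks[0]}
--         r = {t for t in toks if not any(op in t for op in ops)
--              and not t.isnumeric() and t not in reserved}
--         return r, set()
--
--     def solve(lines, c):
--         # returns (live-out set of each non-empty line in order, live-in of the block)
--         if not lines:
--             return [], c
--         if len(lines) == 1:
--             raw = lines[0]
--             if not raw:
--                 return [], c
--             r, w = lex(raw)
--             live_map[code_len - len(live_map)] = c
--             return [c], (c - w) | r
--         mid = len(lines) // 2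
--         e2, c2 = solve(lines[mid:], c)
--         e1, c1 = solve(lines[:mid], c2)
--         return e1 + e2, c1
--
--     entries, cin = solve(code, prev_lives)
--     return [cin] + entries
-- ===== Notes on version B (the rewrite author's own statement) =====
-- stated objective: alternative
-- what changed: A's single backward index loop (lex + dataflow step per iteration, lives.insert(0,...)) is replaced by a divide-and-conquer recursion: the block is split in half, the second half is solved first with the incoming live-out set, its resulting live-in feeds the first half, and the two per-line entry lists are concatenated; lexing uses direct set comprehensions instead of A's split-and-rescan helpers.
import Mathlib
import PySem

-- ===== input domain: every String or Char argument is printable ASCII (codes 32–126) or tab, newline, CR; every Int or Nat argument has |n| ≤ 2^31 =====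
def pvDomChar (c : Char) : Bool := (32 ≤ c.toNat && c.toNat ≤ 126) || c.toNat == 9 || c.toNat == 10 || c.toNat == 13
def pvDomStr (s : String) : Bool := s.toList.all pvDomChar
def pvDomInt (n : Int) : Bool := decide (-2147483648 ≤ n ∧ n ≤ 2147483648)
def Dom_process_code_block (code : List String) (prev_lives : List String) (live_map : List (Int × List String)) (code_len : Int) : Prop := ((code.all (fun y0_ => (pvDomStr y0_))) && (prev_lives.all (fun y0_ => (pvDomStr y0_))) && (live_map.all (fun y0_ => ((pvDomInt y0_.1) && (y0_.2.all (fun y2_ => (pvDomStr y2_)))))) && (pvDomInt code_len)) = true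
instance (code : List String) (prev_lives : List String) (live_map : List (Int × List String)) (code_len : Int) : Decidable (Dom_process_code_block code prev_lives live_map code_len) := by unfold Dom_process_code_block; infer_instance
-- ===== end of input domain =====

-- B replaces A's single backward index loop (which lexes a line and applies the dataflow step per
-- iteration, with lives.insert(0, …)) by a divide-and-conquer recursion: the block is split in
-- half, the second half is solved first with the incoming live-out set, its resulting live-in
-- feeds the first half, and the two entry lists are concatenated; objective: alternative
-- decomposition, same cost. Both A and B mutate the live_map dict argument identically (same
-- keys, values, order); the theorems below are about the RETURN value only (the ports thread the
-- dict state faithfully but it never flows into the result).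

-- shared literal constants and shared built-in wrappers (identical source text in Source A and Source B)
def pvOps : List String := ["+", "!=", "==", ">", "<", ">=", "<=", "-", "(", ")", "[", "]", "{", "}", ":", ",", "."]
def pvReserved : List String := ["if", "while", "return", "else", "(", ")", "[", "]", "{", "}", ":", ","]

-- s.split(" "): sep = " " ≠ "" so Python never raises; total form of PySem.Str.split?
def pvSplitSpace (s : String) : List String := (PySem.Str.split? s " ").getD []

-- the replace/strip chain both sources apply verbatim to a raw line
def pvNormalize (s : String) : String :=
  PySem.Str.strip (PySem.Str.replace (PySem.Str.replace (PySem.Str.replace (PySem.Str.replace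
    (PySem.Str.replace (PySem.Str.replace s "(" "( ") ")" " )") "[" " [ ") "]" " ] ") "}" " }") "," "")

-- ===== PORT A =====
-- is_special_numeric; Python str.isnumeric is ported as PySem.Str.strIsdigit (exact on the ASCII domain)
def is_special_numeric (x : String) : Bool :=
  if PySem.Str.isIn "-" x then PySem.Str.strIsdigit (PySem.Str.replace x "-" "")
  else PySem.Str.strIsdigit x

-- contains_special_char; the nested for/for with early 'return True' is the double `any`
def contains_special_char (line : String) : Bool :=
  (pvSplitSpace line).any (fun x => pvOps.any (fun y => PySem.Str.isIn y x))

-- one iteration of A's backward loop; state = (lives, currset, live_map); the loop variable x is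
-- only used as code[x], so 'for x in range(len(code)-1,-1,-1)' is folded over code.reverse
def pcbA_step (code_len : Int)
    (st : List (List String) × List String × PySem.Dict Int (List String)) (cx : String) :
    List (List String) × List String × PySem.Dict Int (List String) :=
  if cx = "" then st
  else
    let lives := st.2.1 :: st.1                        -- lives.insert(0, currset)
    let line := pvNormalize cx
    let d := st.2.2.insert (code_len - (st.2.2.size : Int)) st.2.1   -- live_map[code_len - len(live_map)] = currset
    let token := pvSplitSpace line
    if PySem.Str.isIn " = " line then
      let r := (PySem.List.pyRange 2 (token.length : Int)).foldl (fun r y =>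
          if !contains_special_char (PySem.List.pyGetD token y "") &&
             !is_special_numeric (PySem.List.pyGetD token y "") &&
             !(pvReserved.contains (PySem.List.pyGetD token y "")) &&
             !(PySem.List.pyGetD token y "" == "")
          then PySem.Set.add r (PySem.List.pyGetD token y "") else r) PySem.Set.empty
      let w := PySem.Set.add PySem.Set.empty (PySem.List.pyGetD token 0 "")
      (lives, PySem.Set.union (PySem.Set.diff st.2.1 w) r, d)
    else
      let r := (PySem.List.pyRange 0 (token.length : Int)).foldl (fun r y =>
          if !contains_special_char (PySem.List.pyGetD token y "") &&
             !PySem.Str.strIsdigit (PySem.List.pyGetD token y "") &&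
             !(pvReserved.contains (PySem.List.pyGetD token y ""))
          then PySem.Set.add r (PySem.List.pyGetD token y "") else r) PySem.Set.empty
      (lives, PySem.Set.union (PySem.Set.diff st.2.1 PySem.Set.empty) r, d)

def process_code_block (code : List String) (prev_lives : List String) (live_map : List (Int × List String)) (code_len : Int) : List (List String) :=
  let st := code.reverse.foldl (pcbA_step code_len) ([], prev_lives, PySem.Dict.ofList live_map)
  st.2.1 :: st.1                                       -- final lives.insert(0, currset)

-- ===== PORT B =====
def pv_is_op (t : String) : Bool := pvOps.any (fun op => PySem.Str.isIn op t)

-- lex: one non-empty line into its (read-set, write-set); toks[2:] = drop 2 (nonneg index)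
def pvParse (raw : String) : List String × List String :=
  let line := pvNormalize raw
  let tokens := pvSplitSpace line
  if PySem.Str.isIn " = " line then
    (PySem.Set.ofList ((tokens.drop 2).filter (fun t =>
        !(t == "") && !pv_is_op t && !PySem.Str.strIsdigit t && !(pvReserved.contains t))),
     PySem.Set.ofList [PySem.List.pyGetD tokens 0 ""])
  else
    (PySem.Set.ofList (tokens.filter (fun t =>
        !pv_is_op t && !PySem.Str.strIsdigit t && !(pvReserved.contains t))),
     PySem.Set.empty)

-- solve(lines, c): divide and conquer; returns (live-out entry of each non-empty line in order,
-- live-in of the block, live_map state); the mutated live_map dict is threaded as the last component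
def pcbB_solve (code_len : Int) (lines : List String) (c : List String)
    (d : PySem.Dict Int (List String)) :
    List (List String) × List String × PySem.Dict Int (List String) :=
  match lines with
  | [] => ([], c, d)
  | [x] =>
    if x = "" then ([], c, d)
    else
      let rw := pvParse x
      let d' := d.insert (code_len - (d.size : Int)) c
      ([c], PySem.Set.union (PySem.Set.diff c rw.2) rw.1, d')
  | a :: b :: rest =>
    let mid := (a :: b :: rest).length / 2
    let s2 := pcbB_solve code_len ((a :: b :: rest).drop mid) c d
    let s1 := pcbB_solve code_len ((a :: b :: rest).take mid) s2.2.1 s2.2.2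
    (s1.1 ++ s2.1, s1.2.1, s1.2.2)
termination_by lines.length
decreasing_by
  · simp; omega
  · simp; omega

def process_code_block_alt (code : List String) (prev_lives : List String) (live_map : List (Int × List String)) (code_len : Int) : List (List String) :=
  let s := pcbB_solve code_len code prev_lives (PySem.Dict.ofList live_map)
  s.2.1 :: s.1                                         -- [cin] + entries

-- ===== PRECONDITION & SPEC =====
def Spec_process_code_block (code : List String) (prev_lives : List String) (live_map : List (Int × List String)) (code_len : Int) (out : List (List String)) : Prop := out = process_code_block_alt code prev_lives live_map code_len
instance (code : List String) (prev_lives : List String) (live_map : List (Int × List String)) (code_len : Int) (out : List (List String)) : Decidable (Spec_process_code_block code prev_lives live_map code_len out) := by unfold Spec_process_code_block; infer_instance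

-- ===== CLAIM (what is proved, stated in full; the proofs are below) =====
def Claim_equal_process_code_block : Prop := ∀ (code : List String) (prev_lives : List String) (live_map : List (Int × List String)) (code_len : Int), Dom_process_code_block code prev_lives live_map code_len → Spec_process_code_block code prev_lives live_map code_len (process_code_block code prev_lives live_map code_len)

-- ===== LEMMAS AND PROOFS =====

-- splitting a space-free character list on " " yields the list itself (any fuel)
theorem pv_splitOn_go_no_space (fuel : Nat) : ∀ (l cur : List Char) (acc : List (List Char)),
    ' ' ∉ l → PySem.Chars.splitOn.go [' '] fuel l cur acc = acc.reverse ++ [cur.reverse ++ l] := by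
  induction fuel with
  | zero => intro l cur acc _; simp [PySem.Chars.splitOn.go]
  | succ n ih =>
    intro l cur acc hl
    cases l with
    | nil => simp [PySem.Chars.splitOn.go]
    | cons c rest =>
      have hc : ¬ (c = ' ') := fun h => hl (by simp [h])
      have hrest : ' ' ∉ rest := fun h => hl (by simp [h])
      simp only [PySem.Chars.splitOn.go, List.isPrefixOf]
      rw [if_neg (by simp; exact fun h => hc h.symm)]
      rw [ih rest (c :: cur) acc hrest]
      simp

-- every chunk produced by splitting on " " is space-free
theorem pv_splitOn_go_chunks (fuel : Nat) : ∀ (l cur : List Char) (acc : List (List Char)),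
    l.length < fuel → (∀ x ∈ acc, ' ' ∉ x) → ' ' ∉ cur →
    ∀ x ∈ PySem.Chars.splitOn.go [' '] fuel l cur acc, ' ' ∉ x := by
  induction fuel with
  | zero => intro l _ _ h; omega
  | succ n ih =>
    intro l cur acc hfuel hacc hcur
    cases l with
    | nil =>
      simp only [PySem.Chars.splitOn.go]
      intro x hx
      simp only [List.mem_reverse, List.mem_cons] at hx
      rcases hx with h | h
      · simpa [h] using hcur
      · exact hacc x h
    | cons c rest =>
      simp only [PySem.Chars.splitOn.go]
      by_cases hc : c = ' '
      · rw [if_pos (by simp [List.isPrefixOf, hc])]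
        refine ih _ _ _ (by simp at hfuel ⊢; omega) ?_ (by simp)
        intro x hx
        simp only [List.mem_cons] at hx
        rcases hx with h | h
        · simpa [h] using hcur
        · exact hacc x h
      · rw [if_neg (by simp; exact fun h => hc h.symm)]
        refine ih _ _ _ (by simp at hfuel ⊢; omega) hacc ?_
        intro h
        rcases List.mem_cons.mp h with h | h
        · exact hc h.symm
        · exact hcur h

theorem pv_splitSpace_eq (s : String) :
    pvSplitSpace s = (PySem.Chars.splitOn s.toList [' ']).map String.ofList := by
  simp [pvSplitSpace, PySem.Str.split?, PySem.Chars.split?]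

theorem pv_splitSpace_self (t : String) (h : ' ' ∉ t.toList) : pvSplitSpace t = [t] := by
  rw [pv_splitSpace_eq, PySem.Chars.splitOn, pv_splitOn_go_no_space _ _ _ _ h]
  simp

theorem pv_mem_splitSpace_no_space (s t : String) (h : t ∈ pvSplitSpace s) : ' ' ∉ t.toList := by
  rw [pv_splitSpace_eq] at h
  rcases List.mem_map.mp h with ⟨l, hl, rfl⟩
  rw [String.toList_ofList]
  exact pv_splitOn_go_chunks _ _ _ _ (by omega) (by simp) (by simp) l hl

-- on a space-free token, A's contains_special_char is B's pv_is_op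
theorem pv_csc_eq (t : String) (h : ' ' ∉ t.toList) : contains_special_char t = pv_is_op t := by
  rw [contains_special_char, pv_splitSpace_self t h]
  simp [pv_is_op]

-- a token with no operator substring has no '-', so is_special_numeric is plain isdigit
theorem pv_isn_eq (t : String) (h : pv_is_op t = false) :
    is_special_numeric t = PySem.Str.strIsdigit t := by
  have hm : PySem.Str.isIn "-" t = false := by
    rw [pv_is_op] at h
    have := List.any_eq_false.mp h "-" (by simp [pvOps])
    simpa using this
  simp only [is_special_numeric, hm, Bool.false_eq_true, if_false]

-- A's per-token condition equals B's, on space-free tokens (assignment branch)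
theorem pv_pred_assign_eq (t : String) (h : ' ' ∉ t.toList) :
    (!contains_special_char t && !is_special_numeric t && !(pvReserved.contains t) && !(t == ""))
      = (!(t == "") && !pv_is_op t && !PySem.Str.strIsdigit t && !(pvReserved.contains t)) := by
  rw [pv_csc_eq t h]
  cases hop : pv_is_op t with
  | false => rw [pv_isn_eq t hop]; cases t == "" <;> simp
  | true => simp

-- and in the non-assignment branch
theorem pv_pred_plain_eq (t : String) (h : ' ' ∉ t.toList) :
    (!contains_special_char t && !PySem.Str.strIsdigit t && !(pvReserved.contains t))
      = (!pv_is_op t && !PySem.Str.strIsdigit t && !(pvReserved.contains t)) := by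
  rw [pv_csc_eq t h]

-- a conditional-add fold over a token list is Set.ofList of the filtered list
theorem pv_fold_add_filter {p : String → Bool} (l : List String) : ∀ (s : PySem.Set String),
    l.foldl (fun r t => if p t then PySem.Set.add r t else r) s
      = (l.filter p).foldl PySem.Set.add s := by
  induction l with
  | nil => intro s; rfl
  | cons x xs ih =>
    intro s
    by_cases hx : p x = true
    · simp [hx, ih]
    · simp [hx, ih]

-- the per-line step of A equals the dataflow step on B's lex of the line
theorem pv_step_eq (cl : Int) (x : String) (hx : ¬ (x = ""))
    (la : List (List String)) (c : List String) (d : PySem.Dict Int (List String)) :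
    pcbA_step cl (la, c, d) x
      = (c :: la,
         PySem.Set.union (PySem.Set.diff c (pvParse x).2) (pvParse x).1,
         d.insert (cl - (d.size : Int)) c) := by
  rw [pcbA_step, if_neg hx, pvParse]
  have htok : ∀ t ∈ pvSplitSpace (pvNormalize x), ' ' ∉ t.toList :=
    fun t ht => pv_mem_splitSpace_no_space _ t ht
  by_cases hassign : PySem.Str.isIn " = " (pvNormalize x) = true
  · simp only [hassign, if_pos]
    refine Prod.ext rfl (Prod.ext ?_ rfl)
    have h2 : (0:Int) ≤ 2 := by norm_num
    rw [PySem.List.foldl_pyRange_pyGetD' (pvSplitSpace (pvNormalize x)) ""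
      (fun r t => if (!contains_special_char t && !is_special_numeric t &&
          !(pvReserved.contains t) && !(t == "")) then PySem.Set.add r t else r)
      PySem.Set.empty h2]
    rw [pv_fold_add_filter]
    rw [PySem.Set.ofList_eq_foldl]
    rw [List.filter_congr (fun t ht => pv_pred_assign_eq t
      (htok t (List.mem_of_mem_drop (by simpa using ht))))]
    rfl
  · simp only [Bool.not_eq_true] at hassign
    simp only [hassign, Bool.false_eq_true, if_false]
    refine Prod.ext rfl (Prod.ext ?_ rfl)
    have h0 : (0:Int) ≤ 0 := le_refl 0
    rw [PySem.List.foldl_pyRange_pyGetD' (pvSplitSpace (pvNormalize x)) ""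
      (fun r t => if (!contains_special_char t && !PySem.Str.strIsdigit t &&
          !(pvReserved.contains t)) then PySem.Set.add r t else r)
      PySem.Set.empty h0]
    rw [pv_fold_add_filter]
    rw [PySem.Set.ofList_eq_foldl]
    rw [List.filter_congr (fun t ht => pv_pred_plain_eq t (htok t (by simpa using ht)))]
    rfl

-- A's fold over a suffix of lines: the lives accumulator is only ever consed onto, so a nonempty
-- starting accumulator factors out
theorem pv_foldA_acc (cl : Int) (L : List String) : ∀ (la : List (List String))
    (c : List String) (d : PySem.Dict Int (List String)),
    L.foldl (pcbA_step cl) (la, c, d)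
      = ((L.foldl (pcbA_step cl) ([], c, d)).1 ++ la,
         (L.foldl (pcbA_step cl) ([], c, d)).2) := by
  induction L with
  | nil => intro la c d; simp
  | cons x xs ih =>
    intro la c d
    by_cases hx : x = ""
    · simp only [List.foldl_cons, pcbA_step, if_pos hx]
      exact ih la c d
    · simp only [List.foldl_cons, pv_step_eq cl x hx]
      rw [ih (c :: la), ih [c]]
      simp

-- abbreviation used only by the proofs: A's backward fold over a block with incoming state
def pvFoldA (cl : Int) (L : List String) (c : List String) (d : PySem.Dict Int (List String)) :
    List (List String) × List String × PySem.Dict Int (List String) :=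
  L.reverse.foldl (pcbA_step cl) ([], c, d)

theorem pv_foldA_append (cl : Int) (l1 l2 : List String) (c : List String)
    (d : PySem.Dict Int (List String)) :
    pvFoldA cl (l1 ++ l2) c d
      = ((pvFoldA cl l1 (pvFoldA cl l2 c d).2.1 (pvFoldA cl l2 c d).2.2).1
           ++ (pvFoldA cl l2 c d).1,
         (pvFoldA cl l1 (pvFoldA cl l2 c d).2.1 (pvFoldA cl l2 c d).2.2).2) := by
  simp only [pvFoldA, List.reverse_append, List.foldl_append]
  rcases h2 : l2.reverse.foldl (pcbA_step cl) ([], c, d) with ⟨e2, c2, d2⟩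
  rw [pv_foldA_acc]

-- main lemma: the divide-and-conquer solve computes exactly A's backward fold
theorem pv_solve_eq_foldA_aux (cl : Int) : ∀ (n : Nat) (lines : List String),
    lines.length ≤ n → ∀ (c : List String) (d : PySem.Dict Int (List String)),
    pcbB_solve cl lines c d = pvFoldA cl lines c d := by
  intro n
  induction n with
  | zero =>
    intro lines h c d
    have : lines = [] := List.eq_nil_of_length_eq_zero (Nat.le_zero.mp h)
    subst this
    simp [pcbB_solve, pvFoldA]
  | succ n ih =>
    intro lines h c d
    match lines with
    | [] => simp [pcbB_solve, pvFoldA]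
    | [x] =>
      by_cases hx : x = ""
      · simp [pcbB_solve, hx, pvFoldA, pcbA_step]
      · simp only [pcbB_solve, if_neg hx, pvFoldA, List.reverse_singleton, List.foldl_cons,
          List.foldl_nil, pv_step_eq cl x hx]
    | a :: b :: rest =>
      have hlen : rest.length + 2 ≤ n + 1 := by simpa using h
      have h2 : 2 ≤ (a :: b :: rest).length := by simp
      have htake : ((a :: b :: rest).take ((a :: b :: rest).length / 2)).length ≤ n := by
        simp; omega
      have hdrop : ((a :: b :: rest).drop ((a :: b :: rest).length / 2)).length ≤ n := by
        simp; omega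
      simp only [pcbB_solve]
      rw [ih _ hdrop, ih _ htake]
      conv_rhs => rw [show (a :: b :: rest) = (a :: b :: rest).take ((a :: b :: rest).length / 2)
          ++ (a :: b :: rest).drop ((a :: b :: rest).length / 2) from (List.take_append_drop _ _).symm]
      rw [pv_foldA_append]

theorem pv_solve_eq_foldA (cl : Int) (lines : List String) (c : List String)
    (d : PySem.Dict Int (List String)) :
    pcbB_solve cl lines c d = pvFoldA cl lines c d :=
  pv_solve_eq_foldA_aux cl lines.length lines (le_refl _) c d

-- ===== VERDICT (by name: the statement is the Claim_ definition above) =====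
theorem process_code_block_spec : Claim_equal_process_code_block := by
  intro code prev_lives live_map code_len _
  show process_code_block code prev_lives live_map code_len = _
  rw [process_code_block, process_code_block_alt, pv_solve_eq_foldA, pvFoldA]
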